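-- pv_equiv track=rewrite | github.com/theosfa/programming | Irina/zadanie domowe1/test.py | decodify
-- ===== SOURCE A (Python) =====
-- def decodify(list1:list, txt: str) ->list:
--     l_res1 = [None] * len(txt)
--
--     num1 = 0
--     num2 = 0
--     num3 = 0
--     for i in range(0, len(txt), 1):
--         if i % 4 == 0 or i == 0:
--             l_res1[i] = str(list1[0][num1])
--             num1 += 1
--         elif i % 2 == 0:
--             l_res1[i] = str(list1[2][num2])
--             num2 += 1
--         elif i % 2 != 0:
--             l_res1[i] = str(list1[1][num3])
--             num3 += 1
--     return l_res1
-- ===== SOURCE B (Python) =====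
-- def decodify(list1: list, txt: str) -> list:
--     # Three strided fill passes over a preallocated result instead of one
--     # counter-driven interleaved loop.
--     n = len(txt)
--     res = [None] * n
--     for k in range((n + 3) // 4):
--         res[4 * k] = str(list1[0][k])
--     for k in range(n // 2):
--         res[2 * k + 1] = str(list1[1][k])
--     for k in range((n + 1) // 4):
--         res[4 * k + 2] = str(list1[2][k])
--     return res
-- ===== Notes on version B (the rewrite author's own statement) =====
-- stated objective: alternative
-- what changed: Replaced the single interleaved loop with three running counters by three independent strided fill passes (res[4k], res[2k+1], res[4k+2]) over a preallocated result, each consuming one source list in order.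
import Mathlib
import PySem

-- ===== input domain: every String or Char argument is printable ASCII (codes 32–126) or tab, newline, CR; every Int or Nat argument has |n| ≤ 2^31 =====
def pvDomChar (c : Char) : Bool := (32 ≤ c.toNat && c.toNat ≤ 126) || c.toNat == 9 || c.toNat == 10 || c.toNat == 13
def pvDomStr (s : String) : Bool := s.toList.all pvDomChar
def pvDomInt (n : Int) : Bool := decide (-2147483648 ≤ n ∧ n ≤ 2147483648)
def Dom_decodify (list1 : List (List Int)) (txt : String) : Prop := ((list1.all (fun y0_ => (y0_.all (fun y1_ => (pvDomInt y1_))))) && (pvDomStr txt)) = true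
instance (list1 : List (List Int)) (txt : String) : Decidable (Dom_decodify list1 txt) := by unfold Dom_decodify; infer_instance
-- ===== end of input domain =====

-- B replaces A's single interleaved loop (three running counters num1/num2/num3) by three
-- independent strided fill passes over a preallocated result; same cost, different decomposition.

-- ===== PORT A =====
-- A's loop body: state (l_res1, num1, num2, num3); element accesses use pyGetD, in range under Pre_.
-- Python's [None]*len(txt) is ported as a placeholder "" list: under Pre_ every cell is overwritten.
def decodifyStep (list1 : List (List Int)) (st : List String × Int × Int × Int) (i : Int) :
    List String × Int × Int × Int :=
  let res := st.1; let num1 := st.2.1; let num2 := st.2.2.1; let num3 := st.2.2.2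
  if PySem.Int.mod i 4 = 0 ∨ i = 0 then
    (PySem.List.pySetD res i (PySem.Int.toStr (PySem.List.pyGetD (PySem.List.pyGetD list1 0 []) num1 0)),
      num1 + 1, num2, num3)
  else if PySem.Int.mod i 2 = 0 then
    (PySem.List.pySetD res i (PySem.Int.toStr (PySem.List.pyGetD (PySem.List.pyGetD list1 2 []) num2 0)),
      num1, num2 + 1, num3)
  else if PySem.Int.mod i 2 ≠ 0 then
    (PySem.List.pySetD res i (PySem.Int.toStr (PySem.List.pyGetD (PySem.List.pyGetD list1 1 []) num3 0)),
      num1, num2, num3 + 1)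
  else (res, num1, num2, num3)

def decodify (list1 : List (List Int)) (txt : String) : List String :=
  ((PySem.List.pyRange 0 (PySem.Str.len txt) 1).foldl (decodifyStep list1)
    (List.replicate (PySem.Str.len txt).toNat "", 0, 0, 0)).1

-- ===== PORT B =====
-- Source B: res = [None]*n (placeholder "" here, every cell overwritten under Pre_), then three
-- strided passes res[4k], res[2k+1], res[4k+2].
def decodify_alt (list1 : List (List Int)) (txt : String) : List String :=
  let n := (PySem.Str.len txt).toNat
  let res0 := List.replicate n ""
  let r1 := (List.range ((n + 3) / 4)).foldl
    (fun r k => r.set (4 * k) (PySem.Int.toStr (PySem.List.pyGetD (PySem.List.pyGetD list1 0 []) (k : Int) 0))) res0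
  let r2 := (List.range (n / 2)).foldl
    (fun r k => r.set (2 * k + 1) (PySem.Int.toStr (PySem.List.pyGetD (PySem.List.pyGetD list1 1 []) (k : Int) 0))) r1
  (List.range ((n + 1) / 4)).foldl
    (fun r k => r.set (4 * k + 2) (PySem.Int.toStr (PySem.List.pyGetD (PySem.List.pyGetD list1 2 []) (k : Int) 0))) r2

-- ===== PRECONDITION & SPEC =====
-- Pre_: exactly the inputs on which A returns without an IndexError — list1 has as many rows
-- as the text length forces A to touch, each row long enough for its counter's final value.
def Pre_decodify (list1 : List (List Int)) (txt : String) : Prop :=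
  (1 ≤ txt.toList.length → 1 ≤ list1.length ∧ (txt.toList.length + 3) / 4 ≤ (list1.getD 0 []).length) ∧
  (2 ≤ txt.toList.length → 2 ≤ list1.length ∧ txt.toList.length / 2 ≤ (list1.getD 1 []).length) ∧
  (3 ≤ txt.toList.length → 3 ≤ list1.length ∧ (txt.toList.length + 1) / 4 ≤ (list1.getD 2 []).length)
instance (list1 : List (List Int)) (txt : String) : Decidable (Pre_decodify list1 txt) := by
  unfold Pre_decodify; infer_instance
def pvWitness_decodify : List (List Int) × String := ([[1, 2], [3, 4, 5], [6, 7]], "abcdef")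

def Spec_decodify (list1 : List (List Int)) (txt : String) (out : List String) : Prop := out = decodify_alt list1 txt
instance (list1 : List (List Int)) (txt : String) (out : List String) : Decidable (Spec_decodify list1 txt out) := by unfold Spec_decodify; infer_instance

-- ===== CLAIM (what is proved, stated in full; the proofs are below) =====
def Claim_equal_decodify : Prop := ∀ (list1 : List (List Int)) (txt : String), Dom_decodify list1 txt → Pre_decodify list1 txt → Spec_decodify list1 txt (decodify list1 txt)

-- ===== LEMMAS AND PROOFS =====

-- The common closed form: the value both programs put at position j.
def cellVal (list1 : List (List Int)) (j : Nat) : String :=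
  if j % 4 = 0 then PySem.Int.toStr ((PySem.List.pyGetD list1 0 []).getD (j / 4) 0)
  else if j % 2 = 1 then PySem.Int.toStr ((PySem.List.pyGetD list1 1 []).getD (j / 2) 0)
  else PySem.Int.toStr ((PySem.List.pyGetD list1 2 []).getD (j / 4) 0)

lemma pass_length (g : Nat → String) (a s : Nat) :
    ∀ (m : Nat) (res : List String),
      ((List.range m).foldl (fun r k => r.set (a + s * k) (g k)) res).length = res.length := by
  intro m
  induction m with
  | zero => intro res; simp
  | succ m ih =>
    intro res
    rw [List.range_succ, List.foldl_append]
    simp [ih res]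

lemma pass_getElem? (g : Nat → String) (a s : Nat) (hs : 0 < s) :
    ∀ (m : Nat) (res : List String), (∀ k, k < m → a + s * k < res.length) → ∀ j : Nat,
      ((List.range m).foldl (fun r k => r.set (a + s * k) (g k)) res)[j]?
      = if a ≤ j ∧ (j - a) % s = 0 ∧ j < a + s * m then some (g ((j - a) / s)) else res[j]? := by
  intro m
  induction m with
  | zero =>
    intro res _ j
    rw [if_neg (by omega)]
    simp
  | succ m ih =>
    intro res hlen j
    rw [List.range_succ, List.foldl_append]
    simp only [List.foldl_cons, List.foldl_nil]
    rw [List.getElem?_set]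
    by_cases hj : a + s * m = j
    · subst hj
      have h1 : a + s * m < ((List.range m).foldl (fun r k => r.set (a + s * k) (g k)) res).length := by
        rw [pass_length]; exact hlen m (Nat.lt_succ_self m)
      have hc : a ≤ a + s * m ∧ (a + s * m - a) % s = 0 ∧ a + s * m < a + s * (m + 1) := by
        refine ⟨Nat.le_add_right _ _, ?_, ?_⟩
        · simp [Nat.mul_mod_right]
        · have : s * m < s * (m + 1) := (Nat.mul_lt_mul_left hs).mpr (by omega)
          omega
      have hd : (a + s * m - a) / s = m := by
        simp [Nat.mul_div_cancel_left _ hs]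
      rw [if_pos rfl, if_pos h1, if_pos hc, hd]
    · rw [if_neg hj, ih res (fun k hk => hlen k (Nat.lt_succ_of_lt hk)) j]
      congr 1
      by_cases hc : a ≤ j ∧ (j - a) % s = 0 ∧ j < a + s * m
      · have h2 : j < a + s * (m + 1) := by
          have : s * m < s * (m + 1) := (Nat.mul_lt_mul_left hs).mpr (by omega)
          omega
        exact propext (iff_of_true hc ⟨hc.1, hc.2.1, h2⟩)
      · have hn : ¬ (a ≤ j ∧ (j - a) % s = 0 ∧ j < a + s * (m + 1)) := by
          rintro ⟨h1, h2, h3⟩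
          apply hc
          refine ⟨h1, h2, ?_⟩
          obtain ⟨q, hq⟩ := Nat.dvd_of_mod_eq_zero h2
          have hj' : j = a + s * q := by omega
          have hq1 : s * q < s * (m + 1) := by omega
          have hq2 : q < m + 1 := Nat.lt_of_mul_lt_mul_left hq1
          have hq3 : q ≠ m := by rintro rfl; omega
          have : s * q < s * m := (Nat.mul_lt_mul_left hs).mpr (by omega)
          omega
        exact propext (iff_of_false hc hn)

lemma decodify_loop (list1 : List (List Int)) (N : Nat) :
    ∀ n : Nat, n ≤ N →
      (List.range n).foldl (fun st (k : Nat) => decodifyStep list1 st (k : Int)) (List.replicate N "", 0, 0, 0)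
      = ((List.range n).map (cellVal list1) ++ List.replicate (N - n) "",
          (((n + 3) / 4 : Nat) : Int), (((n + 1) / 4 : Nat) : Int), ((n / 2 : Nat) : Int)) := by
  intro n
  induction n with
  | zero => intro _; simp
  | succ n ih =>
    intro hn
    rw [List.range_succ, List.foldl_append, List.foldl_cons, List.foldl_nil,
        ih (Nat.le_of_succ_le hn)]
    have hlen : ((List.range n).map (cellVal list1)).length = n := by simp
    by_cases h0 : n % 4 = 0
    · have hcond : PySem.Int.mod (n : Int) 4 = 0 ∨ (n : Int) = 0 := by
        rw [PySem.Int.mod_eq_emod_of_pos (by norm_num)]; omega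
      simp only [decodifyStep, if_pos hcond, PySem.List.pySetD_natCast, PySem.List.pyGetD_natCast]
      rw [List.set_append, if_neg (by omega)]
      have hrep : N - n = (N - (n + 1)) + 1 := by omega
      rw [hlen, Nat.sub_self, hrep, List.replicate_succ, List.set_cons_zero]
      simp only [List.map_append, List.map_cons, List.map_nil, Prod.mk.injEq]
      refine ⟨?_, by omega, by omega, by omega⟩
      rw [List.append_assoc]
      congr 2
      simp only [cellVal, if_pos h0]
      have : (n + 3) / 4 = n / 4 := by omega
      rw [this]
    · have hcond : ¬ (PySem.Int.mod (n : Int) 4 = 0 ∨ (n : Int) = 0) := by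
        rw [PySem.Int.mod_eq_emod_of_pos (by norm_num)]; omega
      by_cases h2 : n % 2 = 0
      · -- n % 4 = 2
        have hcond2 : PySem.Int.mod (n : Int) 2 = 0 := by
          rw [PySem.Int.mod_eq_emod_of_pos (by norm_num)]; omega
        simp only [decodifyStep, if_neg hcond, if_pos hcond2, PySem.List.pySetD_natCast,
          PySem.List.pyGetD_natCast]
        rw [List.set_append, if_neg (by omega)]
        have hrep : N - n = (N - (n + 1)) + 1 := by omega
        rw [hlen, Nat.sub_self, hrep, List.replicate_succ, List.set_cons_zero]
        simp only [List.map_append, List.map_cons, List.map_nil, Prod.mk.injEq]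
        refine ⟨?_, by omega, by omega, by omega⟩
        rw [List.append_assoc]
        congr 2
        simp only [cellVal, if_neg h0, if_neg (show ¬ n % 2 = 1 by omega)]
        have : (n + 1) / 4 = n / 4 := by omega
        rw [this]
      · -- n odd
        have hcond2 : ¬ PySem.Int.mod (n : Int) 2 = 0 := by
          rw [PySem.Int.mod_eq_emod_of_pos (by norm_num)]; omega
        simp only [decodifyStep]
        rw [if_neg hcond, if_neg hcond2, if_pos hcond2]
        simp only [PySem.List.pySetD_natCast, PySem.List.pyGetD_natCast]
        rw [List.set_append, if_neg (by omega)]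
        have hrep : N - n = (N - (n + 1)) + 1 := by omega
        rw [hlen, Nat.sub_self, hrep, List.replicate_succ, List.set_cons_zero]
        simp only [List.map_append, List.map_cons, List.map_nil, Prod.mk.injEq]
        refine ⟨?_, by omega, by omega, by omega⟩
        rw [List.append_assoc]
        congr 2
        simp only [cellVal, if_neg h0, if_pos (show n % 2 = 1 by omega)]

lemma decodify_eq_map (list1 : List (List Int)) (txt : String) :
    decodify list1 txt = (List.range txt.toList.length).map (cellVal list1) := by
  unfold decodify
  rw [PySem.Str.len_eq, Int.toNat_natCast, PySem.List.pyRange_zero_nat, List.foldl_map,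
      decodify_loop list1 txt.toList.length txt.toList.length le_rfl]
  simp

lemma decodify_alt_eq_map (list1 : List (List Int)) (txt : String) :
    decodify_alt list1 txt = (List.range txt.toList.length).map (cellVal list1) := by
  unfold decodify_alt
  rw [PySem.Str.len_eq, Int.toNat_natCast]
  set n := txt.toList.length with hn
  set g1 : Nat → String := fun k => PySem.Int.toStr (PySem.List.pyGetD (PySem.List.pyGetD list1 0 []) (k : Int) 0) with hg1
  set g2 : Nat → String := fun k => PySem.Int.toStr (PySem.List.pyGetD (PySem.List.pyGetD list1 1 []) (k : Int) 0) with hg2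
  set g3 : Nat → String := fun k => PySem.Int.toStr (PySem.List.pyGetD (PySem.List.pyGetD list1 2 []) (k : Int) 0) with hg3
  -- rewrite the three pass functions into the a + s * k shape
  have e1 : (fun (r : List String) (k : Nat) => r.set (4 * k) (g1 k)) = fun r k => r.set (0 + 4 * k) (g1 k) := by
    funext r k; rw [Nat.zero_add]
  have e2 : (fun (r : List String) (k : Nat) => r.set (2 * k + 1) (g2 k)) = fun r k => r.set (1 + 2 * k) (g2 k) := by
    funext r k; rw [Nat.add_comm]
  have e3 : (fun (r : List String) (k : Nat) => r.set (4 * k + 2) (g3 k)) = fun r k => r.set (2 + 4 * k) (g3 k) := by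
    funext r k; rw [Nat.add_comm]
  rw [e1, e2, e3]
  have l0 : (List.replicate n "").length = n := by simp
  have l1 : ((List.range ((n + 3) / 4)).foldl (fun r k => r.set (0 + 4 * k) (g1 k)) (List.replicate n "")).length = n := by
    rw [pass_length, l0]
  have l2 : ((List.range (n / 2)).foldl (fun r k => r.set (1 + 2 * k) (g2 k))
      ((List.range ((n + 3) / 4)).foldl (fun r k => r.set (0 + 4 * k) (g1 k)) (List.replicate n ""))).length = n := by
    rw [pass_length, l1]
  apply List.ext_getElem?
  intro j
  rw [pass_getElem? g3 2 4 (by norm_num) _ _ (fun k hk => by rw [l2]; omega) j,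
      pass_getElem? g2 1 2 (by norm_num) _ _ (fun k hk => by rw [l1]; omega) j,
      pass_getElem? g1 0 4 (by norm_num) _ _ (fun k hk => by rw [l0]; omega) j]
  by_cases hjn : j < n
  · have hrhs : ((List.range n).map (cellVal list1))[j]? = some (cellVal list1 j) := by
      rw [List.getElem?_map, List.getElem?_range hjn]; rfl
    rw [hrhs]
    split_ifs with c3 c2 c1
    · -- j % 4 = 2 position, filled by pass 3
      have h0 : ¬ j % 4 = 0 := by omega
      have h2 : ¬ j % 2 = 1 := by omega
      have hidx : (j - 2) / 4 = j / 4 := by omega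
      simp only [hg3, cellVal, if_neg h0, if_neg h2, PySem.List.pyGetD_natCast, hidx]
    · -- odd position, filled by pass 2
      have h0 : ¬ j % 4 = 0 := by omega
      have h2 : j % 2 = 1 := by omega
      have hidx : (j - 1) / 2 = j / 2 := by omega
      simp only [hg2, cellVal, if_neg h0, if_pos h2, PySem.List.pyGetD_natCast, hidx]
    · -- j % 4 = 0 position, filled by pass 1
      have h0 : j % 4 = 0 := by omega
      simp only [hg1, cellVal, if_pos h0, PySem.List.pyGetD_natCast, Nat.sub_zero]
    · exfalso; omega
  · split_ifs with c3 c2 c1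
    · exact absurd c3 (by omega)
    · exact absurd c2 (by omega)
    · exact absurd c1 (by omega)
    · rw [List.getElem?_eq_none (by rw [l0]; omega), List.getElem?_eq_none (by simp; omega)]

-- ===== VERDICT (by name: the statement is the Claim_ definition above) =====
theorem decodify_spec : Claim_equal_decodify := by
  intro list1 txt _ _
  unfold Spec_decodify
  rw [decodify_eq_map, decodify_alt_eq_map]
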